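-- pv_equiv track=rewrite | github.com/HL7Norway/LMDI | scripts/lag-noe.py | has_disabled_parent
-- ===== SOURCE A (Python) =====
-- from typing import Dict, List, Any, Optional
--
-- def has_disabled_parent(path: str, elements: List[Dict]) -> bool:
--     """Check if any parent element in the path is disabled (max=0)."""
--     parts = path.split('.')
--     for i in range(1, len(parts)):
--         parent_path = '.'.join(parts[:i])
--         for elem in elements:
--             if elem.get('path') == parent_path and elem.get('max') == '0':
--                 return True
--     return False
-- ===== SOURCE B (Python) =====
-- def has_disabled_parent(path, elements):
--     """Check if any parent element in the path is disabled (max=0).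
--
--     Single pass over elements: an element disables a parent of `path`
--     exactly when its own path is a proper dotted prefix of `path`.
--     """
--     for elem in elements:
--         p = elem.get('path')
--         if p is not None and elem.get('max') == '0' and path.startswith(p + '.'):
--             return True
--     return False
-- ===== Notes on version B (the rewrite author's own statement) =====
-- stated objective: alternative
-- what changed: Replaces the prefix-enumeration double loop (build every dotted prefix of path, scan all elements for each) by a single pass over elements that tests directly whether each element's path is a proper dotted prefix of path via startswith.
import Mathlib
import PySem

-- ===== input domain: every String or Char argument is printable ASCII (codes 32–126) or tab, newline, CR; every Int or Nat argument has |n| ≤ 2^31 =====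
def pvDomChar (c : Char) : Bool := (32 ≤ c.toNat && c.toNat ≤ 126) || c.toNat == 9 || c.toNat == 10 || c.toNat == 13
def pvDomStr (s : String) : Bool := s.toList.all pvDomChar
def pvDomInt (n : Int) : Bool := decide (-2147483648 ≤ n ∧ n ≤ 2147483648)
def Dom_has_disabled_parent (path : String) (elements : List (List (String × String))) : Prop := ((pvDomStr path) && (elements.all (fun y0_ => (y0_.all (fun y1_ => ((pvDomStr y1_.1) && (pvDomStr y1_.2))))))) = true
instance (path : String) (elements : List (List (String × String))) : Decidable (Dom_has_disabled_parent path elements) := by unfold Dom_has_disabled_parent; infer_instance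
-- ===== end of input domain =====

-- B replaces A's prefix-enumeration double loop by a single pass over elements
-- testing whether each element's path is a proper dotted prefix of `path`.

-- ===== PORT A =====
def has_disabled_parent (path : String) (elements : List (List (String × String))) : Bool :=
  let parts : List String := (PySem.Chars.splitOn path.toList ".".toList).map String.ofList
  (PySem.List.pyRange 1 (parts.length : Int) 1).any (fun i =>
    let parent_path := PySem.Str.join "." (PySem.List.slice parts none (some i))
    elements.any (fun elem =>
      ((PySem.Dict.mk elem).get? "path" == some parent_path) &&
      ((PySem.Dict.mk elem).get? "max" == some "0")))

-- ===== PORT B =====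
def has_disabled_parent_alt (path : String) (elements : List (List (String × String))) : Bool :=
  elements.any (fun elem =>
    match (PySem.Dict.mk elem).get? "path" with
    | some p => ((PySem.Dict.mk elem).get? "max" == some "0") &&
                PySem.Str.startswith path (p ++ ".")
    | none => false)

-- ===== PRECONDITION & SPEC =====
def Spec_has_disabled_parent (path : String) (elements : List (List (String × String))) (out : Bool) : Prop := out = has_disabled_parent_alt path elements
instance (path : String) (elements : List (List (String × String))) (out : Bool) : Decidable (Spec_has_disabled_parent path elements out) := by unfold Spec_has_disabled_parent; infer_instance

-- ===== CLAIM (what is proved, stated in full; the proofs are below) =====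
def Claim_equal_has_disabled_parent : Prop := ∀ (path : String) (elements : List (List (String × String))), Dom_has_disabled_parent path elements → Spec_has_disabled_parent path elements (has_disabled_parent path elements)

-- ===== LEMMAS AND PROOFS =====

-- reference splitter: split a char list at '.' (no fuel)
def pvSplitDot : List Char → List (List Char)
  | [] => [[]]
  | a :: rest => if a = '.' then [] :: pvSplitDot rest else (pvSplitDot rest).modifyHead (a :: ·)

theorem pvSplitDot_ne_nil (cs : List Char) : pvSplitDot cs ≠ [] := by
  cases cs with
  | nil => simp [pvSplitDot]
  | cons a rest =>
    simp only [pvSplitDot]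
    split
    · simp
    · cases h : pvSplitDot rest with
      | nil => exact absurd h (pvSplitDot_ne_nil rest)
      | cons x xs => simp

theorem pvGo_eq (cs : List Char) : ∀ (cur : List Char) (acc : List (List Char)) (fuel : Nat), cs.length < fuel →
    PySem.Chars.splitOn.go ['.'] fuel cs cur acc
      = acc.reverse ++ (pvSplitDot cs).modifyHead (cur.reverse ++ ·) := by
  induction cs with
  | nil =>
    intro cur acc fuel h
    cases fuel with
    | zero => omega
    | succ f =>
      rw [PySem.Chars.splitOn.go]
      · simp [pvSplitDot]
      · omega
  | cons a rest ih =>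
    intro cur acc fuel h
    cases fuel with
    | zero => omega
    | succ f =>
      rw [PySem.Chars.splitOn.go]
      by_cases ha : a = '.'
      · subst ha
        rw [if_pos (by simp [List.isPrefixOf])]
        simp only [List.length_cons, List.drop_succ_cons, List.length_nil, List.drop_zero]
        rw [ih [] (cur.reverse :: acc) f (by simpa using h)]
        simp [pvSplitDot]
        cases hs : pvSplitDot rest <;> simp
      · rw [if_neg (by simp [List.isPrefixOf]; exact fun hh => ha hh.symm)]
        rw [ih (a :: cur) acc f (by simpa using h)]
        simp only [pvSplitDot, if_neg ha]
        cases hs : pvSplitDot rest <;> simp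

theorem pvSplitOn_eq (cs : List Char) : PySem.Chars.splitOn cs ['.'] = pvSplitDot cs := by
  rw [PySem.Chars.splitOn, pvGo_eq cs [] [] (cs.length + 1) (by omega)]
  cases hs : pvSplitDot cs <;> simp

-- join over a list whose head gained a char
theorem pvJoin_cons_head (a : Char) (h : List Char) (r : List (List Char)) :
    PySem.Chars.join ['.'] ((a :: h) :: r) = a :: PySem.Chars.join ['.'] (h :: r) := by
  cases r with
  | nil => simp [PySem.Chars.join_singleton]
  | cons q t => simp [PySem.Chars.join_cons_cons]

theorem pvJoin_nil_head (r : List (List Char)) (hr : r ≠ []) :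
    PySem.Chars.join ['.'] ([] :: r) = '.' :: PySem.Chars.join ['.'] r := by
  cases r with
  | nil => exact absurd rfl hr
  | cons q t => simp [PySem.Chars.join_cons_cons]

theorem pvTake_prefix (cs : List Char) : ∀ i : Nat, 1 ≤ i → i < (pvSplitDot cs).length →
    (PySem.Chars.join ['.'] ((pvSplitDot cs).take i) ++ ['.']) <+: cs := by
  induction cs with
  | nil =>
    intro i h1 h2
    simp [pvSplitDot] at h2
    omega
  | cons a rest ih =>
    intro i h1 h2
    by_cases ha : a = '.'
    · subst ha
      simp only [pvSplitDot, if_true] at h2 ⊢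
      rcases Nat.exists_eq_add_of_le h1 with ⟨j, rfl⟩
      cases j with
      | zero =>
        simp [PySem.Chars.join_singleton]
      | succ k =>
        have hj : 1 ≤ k + 1 := by omega
        have hlen : k + 1 < (pvSplitDot rest).length := by
          simp at h2; omega
        have htk : (pvSplitDot rest).take (k + 1) ≠ [] := by
          have : 0 < ((pvSplitDot rest).take (k + 1)).length := by
            simp; omega
          exact List.ne_nil_of_length_pos this
        have : (1 + (k + 1)) = (k + 1) + 1 := by omega
        rw [this, List.take_succ_cons, pvJoin_nil_head _ htk]
        simp only [List.cons_append]
        exact List.cons_prefix_cons.mpr ⟨rfl, ih (k + 1) hj hlen⟩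
    · obtain ⟨h, t, hs⟩ := List.exists_cons_of_ne_nil (pvSplitDot_ne_nil rest)
      simp only [pvSplitDot, if_neg ha, hs, List.modifyHead] at h2 ⊢
      rcases Nat.exists_eq_add_of_le h1 with ⟨j, rfl⟩
      have : (1 + j) = j + 1 := by omega
      rw [this, List.take_succ_cons, pvJoin_cons_head]
      have hgoal := ih (j + 1) (by omega) (by rw [hs]; simp only [List.length_cons]; simp at h2; omega)
      rw [hs, List.take_succ_cons] at hgoal
      simp only [List.cons_append]
      exact List.cons_prefix_cons.mpr ⟨rfl, hgoal⟩

theorem pvPrefix_take (cs : List Char) : ∀ ps : List Char, (ps ++ ['.']) <+: cs →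
    ∃ i : Nat, 1 ≤ i ∧ i < (pvSplitDot cs).length ∧
      ps = PySem.Chars.join ['.'] ((pvSplitDot cs).take i) := by
  induction cs with
  | nil =>
    intro ps hp
    have := hp.length_le
    simp at this
  | cons a rest ih =>
    intro ps hp
    cases ps with
    | nil =>
      have ha : a = '.' := Eq.symm (by simpa using hp)
      subst ha
      refine ⟨1, le_refl 1, ?_, ?_⟩
      · have := pvSplitDot_ne_nil rest
        simp only [pvSplitDot, if_true, List.length_cons]
        have : 0 < (pvSplitDot rest).length := List.length_pos_of_ne_nil this
        omega
      · simp [pvSplitDot, PySem.Chars.join_singleton]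
    | cons p ps' =>
      have hcons := List.cons_prefix_cons.mp (by simpa using hp)
      obtain ⟨hpa, hp'⟩ := hcons
      obtain ⟨i, h1, h2, h3⟩ := ih ps' hp'
      by_cases ha : a = '.'
      · subst ha
        refine ⟨i + 1, by omega, ?_, ?_⟩
        · simp only [pvSplitDot, if_true, List.length_cons]; omega
        · have htk : (pvSplitDot rest).take i ≠ [] := by
            have : 0 < ((pvSplitDot rest).take i).length := by simp; omega
            exact List.ne_nil_of_length_pos this
          simp only [pvSplitDot, if_true, List.take_succ_cons]
          rw [pvJoin_nil_head _ htk, ← h3, ← hpa]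
      · obtain ⟨h, t, hs⟩ := List.exists_cons_of_ne_nil (pvSplitDot_ne_nil rest)
        rw [hs] at h2 h3
        refine ⟨i, h1, ?_, ?_⟩
        · simp only [pvSplitDot, if_neg ha, hs, List.modifyHead, List.length_cons]
          simpa using h2
        · simp only [pvSplitDot, if_neg ha, hs, List.modifyHead]
          rcases Nat.exists_eq_add_of_le h1 with ⟨j, rfl⟩
          have e : (1 + j) = j + 1 := by omega
          rw [e, List.take_succ_cons, pvJoin_cons_head, ← List.take_succ_cons, ← e, ← h3, ← hpa]

theorem pvMain (path : String) (elements : List (List (String × String))) :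
    has_disabled_parent path elements = has_disabled_parent_alt path elements := by
  unfold has_disabled_parent has_disabled_parent_alt
  rw [Bool.eq_iff_iff]
  simp only [List.any_eq_true]
  have hdot : ".".toList = ['.'] := rfl
  constructor
  · rintro ⟨i, hi, elem, helem, hcond⟩
    rw [PySem.List.mem_pyRange_one] at hi
    rw [Bool.and_eq_true, beq_iff_eq, beq_iff_eq] at hcond
    obtain ⟨hpath, hmax⟩ := hcond
    refine ⟨elem, helem, ?_⟩
    rw [hpath]
    simp only [Bool.and_eq_true, beq_iff_eq]
    refine ⟨hmax, ?_⟩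
    rw [PySem.Str.startswith_eq, PySem.Chars.startswith_iff, String.toList_append, hdot]
    rw [PySem.List.slice_to _ (by omega : (0:Int) ≤ i)]
    unfold PySem.Str.join
    simp only [hdot, pvSplitOn_eq, ← List.map_take, List.map_map, Function.comp_def,
      String.toList_ofList, List.map_id']
    have h2' := hi.2
    simp only [List.length_map, hdot, pvSplitOn_eq] at h2'
    exact pvTake_prefix path.toList i.toNat (by omega) (by omega)
  · rintro ⟨elem, helem, hcond⟩
    cases hget : (PySem.Dict.mk elem).get? "path" with
    | none => rw [hget] at hcond; simp at hcond
    | some p =>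
      rw [hget] at hcond
      simp only [Bool.and_eq_true, beq_iff_eq] at hcond
      obtain ⟨hmax, hsw⟩ := hcond
      rw [PySem.Str.startswith_eq, PySem.Chars.startswith_iff, String.toList_append, hdot] at hsw
      obtain ⟨n, h1, h2, h3⟩ := pvPrefix_take path.toList p.toList hsw
      refine ⟨(n : Int), ?_, elem, helem, ?_⟩
      · rw [PySem.List.mem_pyRange_one]
        rw [hdot, pvSplitOn_eq]
        constructor
        · exact_mod_cast h1
        · simp only [List.length_map]
          exact_mod_cast h2
      · rw [Bool.and_eq_true, beq_iff_eq, beq_iff_eq]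
        refine ⟨?_, hmax⟩
        rw [hget]
        congr 1
        rw [PySem.List.slice_to _ (by omega : (0:Int) ≤ (n:Int))]
        rw [hdot, pvSplitOn_eq, Int.toNat_natCast, ← List.map_take]
        unfold PySem.Str.join
        rw [List.map_map]
        simp only [Function.comp_def, String.toList_ofList, List.map_id']
        rw [hdot]
        conv_lhs => rw [← String.ofList_toList (s := p), h3]

-- ===== VERDICT (by name: the statement is the Claim_ definition above) =====
theorem has_disabled_parent_spec : Claim_equal_has_disabled_parent := by
  intro path elements _
  unfold Spec_has_disabled_parent
  exact pvMain path elements
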